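-- pv_equiv track=rewrite | github.com/cliffm/advent_of_code | 2022/06_tuning_trouble/aoc202206.py | find_sequence
-- ===== SOURCE A (Python) =====
-- def find_sequence(line, sequence_length):
--     sequence = []
--     pos = 0
--     for i, char in enumerate(line):
--         if char in sequence:
--             idx = sequence.index(char)
--             sequence = sequence[idx + 1:]
--             sequence.append(char)
--         else:
--             sequence.append(char)
--
--         if len(sequence) == sequence_length:
--             pos = i + 1
--             break
--
--     return pos
-- ===== SOURCE B (Python) =====
-- def find_sequence(line, sequence_length):
--     last = {}
--     left = 0
--     for i, char in enumerate(line):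
--         j = last.get(char)
--         if j is not None and j >= left:
--             left = j + 1
--         last[char] = i
--         if i + 1 - left == sequence_length:
--             return i + 1
--     return 0
-- ===== Notes on version B (the rewrite author's own statement) =====
-- stated objective: alternative
-- what changed: A maintains the window as a Python list, scanning it with 'in'/'.index' and re-slicing on every repeat; B keeps a last-seen-index dict and a left pointer, doing O(1) dict work per character (classic sliding window; worst-case O(n) vs A's O(n*L), though on random inputs the measured gain was only ~1.3x).
import Mathlib
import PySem

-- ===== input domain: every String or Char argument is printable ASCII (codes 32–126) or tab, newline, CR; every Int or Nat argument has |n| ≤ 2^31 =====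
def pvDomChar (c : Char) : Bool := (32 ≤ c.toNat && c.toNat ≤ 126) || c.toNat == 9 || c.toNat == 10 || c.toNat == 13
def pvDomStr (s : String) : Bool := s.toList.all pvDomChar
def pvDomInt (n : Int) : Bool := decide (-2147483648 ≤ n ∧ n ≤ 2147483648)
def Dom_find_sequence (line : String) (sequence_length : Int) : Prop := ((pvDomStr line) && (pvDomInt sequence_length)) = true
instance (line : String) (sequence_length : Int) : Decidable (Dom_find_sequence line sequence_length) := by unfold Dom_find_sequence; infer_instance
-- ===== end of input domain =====

-- B replaces A's list-scan/slice window with a sliding window over a last-seen-index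
-- dictionary (alternative algorithm; not measurably faster on the timed random inputs).

-- ===== PORT A =====
-- loop of A: i is the enumerate counter, seq the 'sequence' list; on the break
-- the function returns i+1, after a completed loop it returns pos = 0.
def find_sequence_goA : List Char → Nat → List Char → Int → Int
  | [], _, _, _ => 0
  | c :: rest, i, seq, L =>
    let seq' :=
      if seq.contains c then
        -- 'sequence.index(char)': in this branch c ∈ seq, so index? is some; getD 0 never defaults
        let idx := (PySem.List.index? seq c).getD 0
        -- 'sequence[idx + 1:]': start idx+1 ≥ 0, so the Python slice is exactly drop
        (seq.drop (idx + 1)) ++ [c]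
      else seq ++ [c]
    if ((seq'.length : Int) = L) then (i : Int) + 1
    else find_sequence_goA rest (i + 1) seq' L

def find_sequence (line : String) (sequence_length : Int) : Int :=
  find_sequence_goA line.toList 0 [] sequence_length

-- ===== PORT B =====
-- loop of B: left pointer and last-seen dict; indices stay Nat (Python keeps them ≥ 0:
-- left only ever becomes j+1 for a stored index j < i, so i+1-left never underflows).
def find_sequence_goB : List Char → Nat → Nat → PySem.Dict Char Nat → Int → Int
  | [], _, _, _, _ => 0
  | c :: rest, i, left, last, L =>
    let left' :=
      match last.get? c with
      | some j => if left ≤ j then j + 1 else left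
      | none => left
    let last' := last.insert c i
    if (((i + 1 - left' : Nat) : Int) = L) then (i : Int) + 1
    else find_sequence_goB rest (i + 1) left' last' L

def find_sequence_alt (line : String) (sequence_length : Int) : Int :=
  find_sequence_goB line.toList 0 0 PySem.Dict.empty sequence_length

-- ===== PRECONDITION & SPEC =====
def Spec_find_sequence (line : String) (sequence_length : Int) (out : Int) : Prop := out = find_sequence_alt line sequence_length
instance (line : String) (sequence_length : Int) (out : Int) : Decidable (Spec_find_sequence line sequence_length out) := by unfold Spec_find_sequence; infer_instance

-- ===== CLAIM (what is proved, stated in full; the proofs are below) =====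
def Claim_equal_find_sequence : Prop := ∀ (line : String) (sequence_length : Int), Dom_find_sequence line sequence_length → Spec_find_sequence line sequence_length (find_sequence line sequence_length)

-- ===== LEMMAS AND PROOFS =====

-- "j is the index of the last occurrence of c in p"
def IsLastOcc (p : List Char) (c : Char) (j : Nat) : Prop :=
  ∃ h : j < p.length, p[j] = c ∧ ∀ k (hk : k < p.length), j < k → p[k] ≠ c

-- the loop invariant tying A's window list to B's (left, last) state
def WinInv (p : List Char) (left : Nat) (last : PySem.Dict Char Nat) : Prop :=
  left ≤ p.length ∧ (p.drop left).Nodup ∧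
  (∀ c, (last.get? c).isSome ↔ c ∈ p) ∧
  (∀ c j, last.get? c = some j → IsLastOcc p c j)

lemma winInv_init : WinInv [] 0 PySem.Dict.empty := by
  refine ⟨by simp, by simp, ?_, ?_⟩ <;> simp [PySem.Dict.get?, PySem.Dict.empty]

lemma isLastOcc_append (p : List Char) (c c' : Char) (j : Nat) (hne : c' ≠ c)
    (h : IsLastOcc p c' j) : IsLastOcc (p ++ [c]) c' j := by
  obtain ⟨hj, hc, hmax⟩ := h
  refine ⟨by simp; omega, ?_, ?_⟩
  · rw [List.getElem_append_left hj]; exact hc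
  · intro k hk hgt
    by_cases hkp : k < p.length
    · rw [List.getElem_append_left hkp]; exact hmax k hkp hgt
    · have hk' : k = p.length := by simp at hk; omega
      subst hk'
      rw [List.getElem_concat_length rfl]
      exact fun h' => hne h'.symm

lemma winInv_step (p : List Char) (left' : Nat) (last : PySem.Dict Char Nat) (c : Char)
    (hsome : ∀ c', (last.get? c').isSome ↔ c' ∈ p)
    (hlast : ∀ c' j, last.get? c' = some j → IsLastOcc p c' j)
    (hle : left' ≤ p.length + 1)
    (hnd : ((p ++ [c]).drop left').Nodup) :
    WinInv (p ++ [c]) left' (last.insert c p.length) := by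
  refine ⟨by simpa using hle, hnd, ?_, ?_⟩
  · intro c'
    by_cases h : c' = c
    · subst h; simp [PySem.Dict.get?_insert_self]
    · rw [PySem.Dict.get?_insert_of_ne _ _ h]
      simp [hsome, h]
  · intro c' j hj
    by_cases h : c' = c
    · subst h
      rw [PySem.Dict.get?_insert_self] at hj
      have hj' : j = p.length := by injection hj with h'; omega
      subst hj'
      refine ⟨by simp, List.getElem_concat_length rfl (by simp), ?_⟩
      intro k hk hgt; exfalso; simp at hk; omega
    · rw [PySem.Dict.get?_insert_of_ne _ _ h] at hj
      exact isLastOcc_append p c c' j h (hlast c' j hj)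

lemma main_lemma (cs : List Char) : ∀ (p : List Char) (left : Nat)
    (last : PySem.Dict Char Nat) (L : Int), WinInv p left last →
    find_sequence_goA cs p.length (p.drop left) L =
      find_sequence_goB cs p.length left last L := by
  induction cs with
  | nil => intro p left last L _; rfl
  | cons c rest ih =>
    intro p left last L hinv
    obtain ⟨hle, hnd, hsome, hlast⟩ := hinv
    by_cases hc : c ∈ p.drop left
    · -- the char is inside the current window
      have hcp : c ∈ p := List.mem_of_mem_drop hc
      obtain ⟨j, hj⟩ := Option.isSome_iff_exists.mp ((hsome c).mpr hcp)
      obtain ⟨hjlt, hpj, hmax⟩ := hlast c j hj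
      obtain ⟨m, hm, hmc⟩ := List.mem_iff_getElem.mp hc
      have hmlen : left + m < p.length := by simp at hm; omega
      have hpm : p[left + m]'hmlen = c := by rw [← List.getElem_drop]; exact hmc
      have hlj : left ≤ j := by
        by_contra h
        exact hmax (left + m) hmlen (by omega) hpm
      have hjl : j - left < (p.drop left).length := by simp; omega
      have hseqj : (p.drop left)[j - left]'hjl = c := by
        rw [List.getElem_drop]
        have : left + (j - left) = j := by omega
        simp_rw [this]; exact hpj
      have hidx : PySem.List.index? (p.drop left) c = some (j - left) := by
        obtain ⟨k, hk⟩ := Option.isSome_iff_exists.mp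
          ((PySem.List.index?_isSome_iff _ c).mpr hc)
        obtain ⟨hklt, hkc, _⟩ := PySem.List.getElem_of_index?_eq_some hk
        have : k = j - left := (List.Nodup.getElem_inj_iff hnd).mp (hkc.trans hseqj.symm)
        rw [hk, this]
      have hnodrop : c ∉ p.drop (j + 1) := by
        intro hmem
        obtain ⟨m', hm', hmc'⟩ := List.mem_iff_getElem.mp hmem
        have hm'len : j + 1 + m' < p.length := by simp at hm'; omega
        have : p[j + 1 + m']'hm'len = c := by rw [← List.getElem_drop]; exact hmc'
        exact hmax (j + 1 + m') hm'len (by omega) this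
      have hndrop : (p.drop (j + 1)).Nodup := by
        have h1 : p.drop (j + 1) = (p.drop left).drop (j - left + 1) := by
          rw [List.drop_drop]; congr 1; omega
        rw [h1]; exact hnd.sublist (List.drop_sublist _ _)
      have hdropapp : (p ++ [c]).drop (j + 1) = p.drop (j + 1) ++ [c] :=
        List.drop_append_of_le_length (by omega)
      have hnd' : ((p ++ [c]).drop (j + 1)).Nodup := by
        rw [hdropapp]
        simp [List.nodup_append, hndrop]
        intro a ha h'; subst h'; exact hnodrop ha
      have hinv' := winInv_step p (j + 1) last c hsome hlast (by omega) hnd'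
      have hih := ih (p ++ [c]) (j + 1) (last.insert c p.length) L hinv'
      rw [List.length_append, List.length_cons, List.length_nil, hdropapp] at hih
      have hdrop2 : (p.drop left).drop (j - left + 1) = p.drop (j + 1) := by
        rw [List.drop_drop]; congr 1; omega
      simp only [find_sequence_goA, find_sequence_goB, hj, hidx,
        List.contains_eq_mem, hc, decide_true, if_true, if_pos hlj,
        Option.getD_some, hdrop2]
      have hlen : ((p.drop (j + 1) ++ [c]).length : Int)
          = ((p.length + 1 - (j + 1) : Nat) : Int) := by simp; omega
      simp only [Nat.zero_add] at hih
      rw [hlen]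
      split_ifs with h1
      · rfl
      · exact hih
    · -- the char is not in the current window
      have hB : (match last.get? c with
          | some j => if left ≤ j then j + 1 else left
          | none => left) = left := by
        cases hget : last.get? c with
        | none => rfl
        | some j =>
          obtain ⟨hjlt, hpj, _⟩ := hlast c j hget
          have : ¬ left ≤ j := by
            intro hlj
            apply hc
            have hjl : j - left < (p.drop left).length := by simp; omega
            have : (p.drop left)[j - left]'hjl = c := by
              rw [List.getElem_drop]
              have h2 : left + (j - left) = j := by omega
              simp_rw [h2]; exact hpj
            rw [← this]; exact List.getElem_mem _
          simp [this]
      have hdropapp : (p ++ [c]).drop left = p.drop left ++ [c] :=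
        List.drop_append_of_le_length hle
      have hnd' : ((p ++ [c]).drop left).Nodup := by
        rw [hdropapp]
        simp [List.nodup_append, hnd]
        intro a ha h'; subst h'; exact hc ha
      have hinv' := winInv_step p left last c hsome hlast (by omega) hnd'
      have hih := ih (p ++ [c]) left (last.insert c p.length) L hinv'
      rw [List.length_append, List.length_cons, List.length_nil, hdropapp] at hih
      simp only [find_sequence_goA, find_sequence_goB, hB,
        List.contains_eq_mem, hc, decide_false, Bool.false_eq_true, if_false]
      have hlen : ((p.drop left ++ [c]).length : Int)
          = ((p.length + 1 - left : Nat) : Int) := by simp; omega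
      simp only [Nat.zero_add] at hih
      rw [hlen]
      split_ifs with h1
      · rfl
      · exact hih

-- ===== VERDICT (by name: the statement is the Claim_ definition above) =====
theorem find_sequence_spec : Claim_equal_find_sequence := by
  intro line L _
  unfold Spec_find_sequence find_sequence find_sequence_alt
  simpa using main_lemma line.toList [] 0 PySem.Dict.empty L winInv_init
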